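-- pv_equiv track=rewrite | github.com/fatemefallah/basic_py | shayan_sangepa.py | price
-- ===== SOURCE A (Python) =====
-- def is_prime(num): #check if it is prime or not
--     if num == 1:
--         return 0
--     for i in range(2, num):
--         if num % i == 0:
--             return 0
--     return 1
--
-- def price(weights):
--     cnt = 0
--     total = 0
--     #price
--     for i in range(0, len(weights)):
--         if weights[i] == 1:
--             cnt += 0
--         elif is_prime(weights[i]) == 1:
--             for j in range(2, weights[i]):
--                 if is_prime(j) == 1:
--                     cnt += 1
--         else:
--             for k in range(2, weights[i]):
--                 if weights[i] % k == 0 and is_prime(k) == 1: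
--                     cnt += 1
--     total = cnt
--     #with discount
--     dis = 0
--     if total == 1:
--         dis = 0
--     elif is_prime(total) == 1:
--         for k in range(2, total):
--             if is_prime(k) == 1:
--                 dis += 1
--         total = total - dis
--     else:
--         for y in range(2, total):
--             if total % y == 0 and is_prime(y) == 1:
--                 dis += 1
--         total = total - dis
--     return total
-- ===== SOURCE B (Python) =====
-- def price(weights):
--     def nat_prime(n):
--         if n < 2:
--             return False
--         d = 2
--         while d * d <= n:
--             if n % d == 0:
--                 return False
--             d += 1
--         return True
--
--     def omega(n):  # number of distinct prime factors of n
--         c = 0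
--         m = n
--         d = 2
--         while d <= m:
--             if m % d == 0:
--                 c += 1
--                 while m % d == 0:
--                     m //= d
--             d += 1
--         return c
--
--     def score(n):
--         if n <= 2:
--             return 0
--         if nat_prime(n):
--             return sum(1 for j in range(2, n) if nat_prime(j))
--         return omega(n)
--
--     total = sum(score(w) for w in weights)
--     return total if total == 1 else total - score(total)
-- ===== Notes on version B (the rewrite author's own statement) =====
-- stated objective: faster
-- what changed: A tests primality by trial division over all of range(2,n) and re-tests every candidate divisor the same way inside nested loops; B uses a sqrt-bounded primality test and computes the distinct-prime-factor count of composites by a factor-stripping factorisation loop instead of scanning all of range(2,n).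
import Mathlib
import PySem

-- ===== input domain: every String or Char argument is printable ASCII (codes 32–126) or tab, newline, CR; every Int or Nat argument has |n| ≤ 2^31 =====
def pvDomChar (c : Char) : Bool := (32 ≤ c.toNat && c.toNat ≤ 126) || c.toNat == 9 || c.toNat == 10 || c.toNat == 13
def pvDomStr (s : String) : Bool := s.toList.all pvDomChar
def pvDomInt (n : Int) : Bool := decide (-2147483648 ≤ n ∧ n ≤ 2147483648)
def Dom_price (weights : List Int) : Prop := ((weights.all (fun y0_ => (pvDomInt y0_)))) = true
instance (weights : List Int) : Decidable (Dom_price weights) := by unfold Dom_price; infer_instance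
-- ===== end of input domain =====

-- B replaces A's O(w) trial division and per-candidate re-tests by a √w primality test and a
-- factor-stripping factorisation loop (objective: faster, same return value on every input).

-- ===== PORT A =====
-- is_prime: trial division over the full range(2, num)
def isPrimeGo (num : Int) : List Int → Int
  | [] => 1
  | i :: rest => if PySem.Int.mod num i = 0 then 0 else isPrimeGo num rest

def isPrime (num : Int) : Int :=
  if num = 1 then 0 else isPrimeGo num (PySem.List.pyRange 2 num 1)

-- the main loop 'for i in range(0, len(weights))' with 'weights[i]' is ported as a fold over the list
def price (weights : List Int) : Int :=
  let cnt := weights.foldl (fun cnt w =>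
    if w = 1 then cnt
    else if isPrime w = 1 then
      (PySem.List.pyRange 2 w 1).foldl (fun c j => if isPrime j = 1 then c + 1 else c) cnt
    else
      (PySem.List.pyRange 2 w 1).foldl
        (fun c k => if PySem.Int.mod w k = 0 ∧ isPrime k = 1 then c + 1 else c) cnt) 0
  let total := cnt
  if total = 1 then total
  else if isPrime total = 1 then
    let dis := (PySem.List.pyRange 2 total 1).foldl (fun d k => if isPrime k = 1 then d + 1 else d) 0
    total - dis
  else
    let dis := (PySem.List.pyRange 2 total 1).foldl
      (fun d y => if PySem.Int.mod total y = 0 ∧ isPrime y = 1 then d + 1 else d) 0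
    total - dis

-- ===== PORT B =====
-- The helpers carry an explicit fuel argument only to make the while-loops structurally
-- recursive (so the kernel can evaluate them); the fuel supplied always suffices.

-- nat_prime's while loop 'while d * d <= n'
def natPrimeGo : Nat → Nat → Nat → Bool
  | 0, _, _ => true
  | fuel + 1, n, d => if d * d ≤ n then (if n % d = 0 then false else natPrimeGo fuel n (d + 1)) else true

def natPrime (n : Nat) : Bool := if n < 2 then false else natPrimeGo n n 2

-- inner 'while m % d == 0: m //= d'
def stripFac : Nat → Nat → Nat → Nat
  | 0, m, _ => m
  | fuel + 1, m, d => if 2 ≤ d ∧ m % d = 0 ∧ 0 < m then stripFac fuel (m / d) d else m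

-- outer 'while d <= m' of omega
def omegaGo : Nat → Nat → Nat → Nat → Nat
  | 0, _, _, c => c
  | fuel + 1, m, d, c =>
    if d ≤ m then
      if m % d = 0 then omegaGo fuel (stripFac m m d) (d + 1) (c + 1)
      else omegaGo fuel m (d + 1) c
    else c

-- score(n): 0 for n <= 2; primes below n if n is prime; number of distinct prime factors otherwise
def scoreB (n : Int) : Int :=
  if n ≤ 2 then 0
  else
    let m := n.toNat
    if natPrime m then ((List.range' 2 (m - 2)).countP natPrime : Int)
    else (omegaGo (m + 1) m 2 0 : Int)

def price_alt (weights : List Int) : Int :=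
  let total := (weights.map scoreB).sum
  if total = 1 then total else total - scoreB total

-- ===== PRECONDITION & SPEC =====
def Spec_price (weights : List Int) (out : Int) : Prop := out = price_alt weights
instance (weights : List Int) (out : Int) : Decidable (Spec_price weights out) := by unfold Spec_price; infer_instance

-- ===== CLAIM (what is proved, stated in full; the proofs are below) =====
def Claim_equal_price : Prop := ∀ (weights : List Int), Dom_price weights → Spec_price weights (price weights)

-- ===== LEMMAS AND PROOFS =====

theorem isPrimeGo_eq_one_iff (num : Int) (l : List Int) :
    isPrimeGo num l = 1 ↔ ∀ i ∈ l, PySem.Int.mod num i ≠ 0 := by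
  induction l with
  | nil => simp [isPrimeGo]
  | cons i rest ih =>
    simp only [isPrimeGo, List.mem_cons]
    split
    · simp_all
    · simp_all

theorem isPrime_eq_one_of_le_two (n : Int) (h1 : n ≠ 1) (h2 : n ≤ 2) : isPrime n = 1 := by
  unfold isPrime
  rw [if_neg h1, PySem.List.pyRange_one_eq_nil h2]
  rfl

theorem isPrime_iff_prime (n : Int) (h2 : 2 ≤ n) : isPrime n = 1 ↔ Nat.Prime n.toNat := by
  unfold isPrime
  rw [if_neg (by omega), isPrimeGo_eq_one_iff]
  rw [Nat.prime_def_lt']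
  constructor
  · intro h
    refine ⟨by omega, fun m hm2 hmlt hdvd => ?_⟩
    have hmem : (m : Int) ∈ PySem.List.pyRange 2 n 1 := by
      rw [PySem.List.mem_pyRange_one]
      constructor <;> [exact_mod_cast hm2; omega]
    apply h _ hmem
    rw [PySem.Int.mod_eq_zero_iff_dvd]
    have : (m : Int) ∣ (n.toNat : Int) := Int.natCast_dvd_natCast.mpr hdvd
    rwa [Int.toNat_of_nonneg (by omega)] at this
  · rintro ⟨-, h⟩ i hi hmod
    rw [PySem.List.mem_pyRange_one] at hi
    rw [PySem.Int.mod_eq_zero_iff_dvd] at hmod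
    have h2i : (2:Int) ≤ i := hi.1
    refine h i.toNat (by omega) (by omega) ?_
    have : i ∣ (n.toNat : Int) := by rwa [Int.toNat_of_nonneg (by omega)]
    rw [← Int.toNat_of_nonneg (show (0:Int) ≤ i by omega)] at this
    exact_mod_cast this

-- ---- B's primality test ----

theorem natPrimeGo_eq_true_iff (fuel n d : Nat) (hf : n + 1 ≤ fuel + d) :
    natPrimeGo fuel n d = true ↔ ∀ m, d ≤ m → m * m ≤ n → ¬ m ∣ n := by
  induction fuel generalizing d with
  | zero =>
    simp only [natPrimeGo, true_iff]
    intro m hm hsq hdvd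
    have h1 : 0 < m := by omega
    have h2 : m ≤ m * m := Nat.le_mul_of_pos_left m h1
    omega
  | succ fuel ih =>
    simp only [natPrimeGo]
    split
    · split
      · simp only [Bool.false_eq_true, false_iff]
        intro h
        exact h d (le_refl d) (by assumption) (Nat.dvd_iff_mod_eq_zero.mpr (by assumption))
      · rw [ih (d + 1) (by omega)]
        constructor
        · intro h m hm hsq
          rcases Nat.lt_or_ge d m with h' | h'
          · exact h m (by omega) hsq
          · have heq : m = d := by omega
            subst heq
            intro hdvd
            exact absurd (Nat.dvd_iff_mod_eq_zero.mp hdvd) (by assumption)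
        · intro h m hm hsq
          exact h m (by omega) hsq
    · simp only [true_iff]
      intro m hm hsq hdvd
      have hdd : ¬ d * d ≤ n := by assumption
      have : d * d ≤ m * m := Nat.mul_le_mul hm hm
      omega

theorem natPrime_iff (n : Nat) : natPrime n = true ↔ Nat.Prime n := by
  unfold natPrime
  split
  · simp only [Bool.false_eq_true, false_iff]
    intro hp
    exact absurd hp.two_le (by omega)
  · rw [natPrimeGo_eq_true_iff n n 2 (by omega), Nat.prime_def_le_sqrt]
    constructor
    · intro h
      exact ⟨by omega, fun m hm2 hsq => h m hm2 (Nat.le_sqrt.mp hsq)⟩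
    · rintro ⟨-, h⟩ m hm2 hsq
      exact h m hm2 (Nat.le_sqrt.mpr hsq)

-- ---- B's factorisation loop computes the number of distinct prime factors ----

theorem stripFac_le (fuel m d : Nat) : stripFac fuel m d ≤ m := by
  induction fuel generalizing m with
  | zero => exact le_refl m
  | succ fuel ih =>
    simp only [stripFac]
    split
    · exact le_trans (ih (m / d)) (Nat.div_le_self m d)
    · exact le_refl m

theorem stripFac_pos (fuel m d : Nat) (hm : 0 < m) : 0 < stripFac fuel m d := by
  induction fuel generalizing m with
  | zero => exact hm
  | succ fuel ih =>
    simp only [stripFac]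
    split
    · next h =>
      apply ih
      have hdv : d ∣ m := Nat.dvd_iff_mod_eq_zero.mpr h.2.1
      exact Nat.div_pos (Nat.le_of_dvd h.2.2 hdv) (by omega)
    · exact hm

theorem stripFac_not_dvd (fuel m d : Nat) (hd : 2 ≤ d) (hm : 0 < m) (hfuel : m ≤ fuel) :
    ¬ d ∣ stripFac fuel m d := by
  induction fuel generalizing m with
  | zero => omega
  | succ fuel ih =>
    simp only [stripFac]
    split
    · next h =>
      have hlt : m / d < m := Nat.div_lt_self h.2.2 (by omega)
      have hdv : d ∣ m := Nat.dvd_iff_mod_eq_zero.mpr h.2.1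
      exact ih (m / d) (Nat.div_pos (Nat.le_of_dvd h.2.2 hdv) (by omega)) (by omega)
    · next h =>
      intro hdvd
      exact h ⟨hd, Nat.dvd_iff_mod_eq_zero.mp hdvd, hm⟩

theorem stripFac_dvd_iff (fuel m d : Nat) (hd : Nat.Prime d) (hm : 0 < m)
    (p : Nat) (hp : Nat.Prime p) (hpd : p ≠ d) : (p ∣ stripFac fuel m d ↔ p ∣ m) := by
  induction fuel generalizing m with
  | zero => exact Iff.rfl
  | succ fuel ih =>
    simp only [stripFac]
    split
    · next h =>
      have hddvd : d ∣ m := Nat.dvd_iff_mod_eq_zero.mpr h.2.1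
      have hpos : 0 < m / d := Nat.div_pos (Nat.le_of_dvd h.2.2 hddvd) (by omega)
      rw [ih (m / d) hpos]
      constructor
      · intro hp'
        exact dvd_trans hp' (Nat.div_dvd_of_dvd hddvd)
      · intro hp'
        have hmul : m = m / d * d := (Nat.div_mul_cancel hddvd).symm
        rw [hmul] at hp'
        rcases (Nat.Prime.dvd_mul hp).mp hp' with h' | h'
        · exact h'
        · exact absurd ((Nat.prime_dvd_prime_iff_eq hp hd).mp h') hpd
    · exact Iff.rfl

theorem stripFac_primeFactors (fuel m d : Nat) (hd : Nat.Prime d) (hm : 0 < m)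
    (hfuel : m ≤ fuel) :
    (stripFac fuel m d).primeFactors = m.primeFactors.erase d := by
  ext p
  rw [Finset.mem_erase, Nat.mem_primeFactors, Nat.mem_primeFactors]
  constructor
  · rintro ⟨hp, hdvd, -⟩
    have hpd : p ≠ d := by
      intro hpe
      rw [hpe] at hdvd
      exact stripFac_not_dvd fuel m d hd.two_le hm hfuel hdvd
    exact ⟨hpd, hp, (stripFac_dvd_iff fuel m d hd hm p hp hpd).mp hdvd, by omega⟩
  · rintro ⟨hpd, hp, hdvd, -⟩
    exact ⟨hp, (stripFac_dvd_iff fuel m d hd hm p hp hpd).mpr hdvd,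
      by have := stripFac_pos fuel m d hm; omega⟩

theorem primeFactors_empty_of_gt (m d : Nat) (hm : 0 < m) (hle : ¬ d ≤ m)
    (hinv : ∀ p, Nat.Prime p → p ∣ m → d ≤ p) : m.primeFactors = ∅ := by
  ext p
  simp only [Nat.mem_primeFactors, Finset.notMem_empty, iff_false]
  rintro ⟨hp, hdvd, -⟩
  have h1 := hinv p hp hdvd
  have h2 := Nat.le_of_dvd hm hdvd
  omega

theorem omegaGo_eq (fuel m d c : Nat) (hm : 0 < m) (hd : 2 ≤ d) (hf : m + 2 ≤ fuel + d)
    (hinv : ∀ p, Nat.Prime p → p ∣ m → d ≤ p) :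
    omegaGo fuel m d c = c + m.primeFactors.card := by
  induction fuel generalizing m d c with
  | zero =>
    rw [primeFactors_empty_of_gt m d hm (by omega) hinv]
    simp [omegaGo]
  | succ fuel ih =>
    simp only [omegaGo]
    split
    · next hle =>
      split
      · next hmod =>
        have hddvd : d ∣ m := Nat.dvd_iff_mod_eq_zero.mpr hmod
        have hdprime : Nat.Prime d := by
          have hq := Nat.minFac_prime (show d ≠ 1 by omega)
          have h1 : d.minFac ∣ m := dvd_trans (Nat.minFac_dvd d) hddvd
          have h2 : d ≤ d.minFac := hinv _ hq h1
          have h3 : d.minFac ≤ d := Nat.minFac_le (by omega)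
          have h4 : d.minFac = d := by omega
          rwa [← h4]
        have hdmem : d ∈ m.primeFactors :=
          Nat.mem_primeFactors.mpr ⟨hdprime, hddvd, by omega⟩
        have hpos' : 0 < stripFac m m d := stripFac_pos m m d hm
        have hle' : stripFac m m d ≤ m := stripFac_le m m d
        have hpf : (stripFac m m d).primeFactors = m.primeFactors.erase d :=
          stripFac_primeFactors m m d hdprime hm (le_refl m)
        rw [ih (stripFac m m d) (d + 1) (c + 1) hpos' (by omega) (by omega) ?_]
        · rw [hpf, Finset.card_erase_of_mem hdmem]
          have : 1 ≤ m.primeFactors.card := Finset.card_pos.mpr ⟨d, hdmem⟩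
          omega
        · intro p hp hpdvd
          have hpm : p ∈ (stripFac m m d).primeFactors :=
            Nat.mem_primeFactors.mpr ⟨hp, hpdvd, by omega⟩
          rw [hpf, Finset.mem_erase, Nat.mem_primeFactors] at hpm
          have := hinv p hp hpm.2.2.1
          have := hpm.1
          omega
      · next hmod =>
        apply ih m (d + 1) c hm (by omega) (by omega)
        intro p hp hpdvd
        have := hinv p hp hpdvd
        have hpd : p ≠ d := by
          rintro rfl
          exact hmod (Nat.dvd_iff_mod_eq_zero.mp hpdvd)
        omega
    · next hle =>
      rw [primeFactors_empty_of_gt m d hm hle hinv]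
      simp

-- ---- counting over the Python range equals counting over B's Nat range ----

theorem foldl_count (p : Int → Prop) [DecidablePred p] (l : List Int) (c : Int) :
    l.foldl (fun c x => if p x then c + 1 else c) c
      = c + (l.countP (fun x => decide (p x)) : Int) :=
  PySem.List.foldl_ite_add_one p l c

theorem range'_eq (m : Nat) :
    List.range' 2 (m - 2) = (List.range (m - 2)).map (fun k => 2 + k) := by
  rw [List.range'_eq_map_range]

-- A's count of primes below w equals B's
theorem primeCount_eq (w : Int) (hw : 3 ≤ w) :
    ((PySem.List.pyRange 2 w 1).countP (fun j => decide (isPrime j = 1)) : Nat)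
      = (List.range' 2 (w.toNat - 2)).countP natPrime := by
  rw [PySem.List.pyRange_one, List.countP_map, range'_eq w.toNat, List.countP_map]
  have hcast : ((w - 2).toNat) = w.toNat - 2 := by omega
  rw [hcast]
  apply List.countP_congr
  intro k hk
  simp only [Function.comp_apply]
  have h2k : (2:Int) ≤ 2 + (k:Int) := by omega
  rw [decide_eq_true_iff, isPrime_iff_prime _ h2k, natPrime_iff]
  have : ((2:Int) + (k:Int)).toNat = 2 + k := by omega
  rw [this]

-- A's count of prime divisors of w equals the number of distinct prime factors, for composite w
theorem divisorCount_eq (w : Int) (hw : 2 ≤ w) (hnp : ¬ Nat.Prime w.toNat) :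
    ((PySem.List.pyRange 2 w 1).countP
        (fun k => decide (PySem.Int.mod w k = 0 ∧ isPrime k = 1)) : Nat)
      = (w.toNat).primeFactors.card := by
  set m := w.toNat with hm
  have hwm : w = (m : Int) := by omega
  rw [PySem.List.pyRange_one, List.countP_map]
  have hcast : ((w - 2).toNat) = m - 2 := by omega
  rw [hcast]
  have hstep : List.countP ((fun k => decide (PySem.Int.mod w k = 0 ∧ isPrime k = 1)) ∘
        (fun k : Nat => (2:Int) + k)) (List.range (m - 2))
      = List.countP (fun j : Nat => decide (j ∣ m ∧ Nat.Prime j)) (List.range' 2 (m - 2)) := by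
    rw [range'_eq m, List.countP_map]
    apply List.countP_congr
    intro k hk
    simp only [Function.comp_apply, decide_eq_true_iff]
    have h2k : (2:Int) ≤ 2 + (k:Int) := by omega
    rw [PySem.Int.mod_eq_zero_iff_dvd, isPrime_iff_prime _ h2k]
    have ht : ((2:Int) + (k:Int)).toNat = 2 + k := by omega
    rw [ht, hwm]
    constructor
    · rintro ⟨h1, h2⟩
      exact ⟨by exact_mod_cast h1, h2⟩
    · rintro ⟨h1, h2⟩
      exact ⟨by exact_mod_cast h1, h2⟩
  rw [hstep]
  have hnodup : (List.range' 2 (m - 2)).Nodup := List.nodup_range' 1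
  have hfn : ((List.range' 2 (m - 2)).filter
      (fun j : Nat => decide (j ∣ m ∧ Nat.Prime j))).Nodup :=
    List.Nodup.filter _ hnodup
  rw [List.countP_eq_length_filter, ← List.toFinset_card_of_nodup hfn]
  congr 1
  apply Finset.ext
  intro p
  rw [List.mem_toFinset, List.mem_filter, List.mem_range'_1, Nat.mem_primeFactors,
    decide_eq_true_iff]
  constructor
  · rintro ⟨hrange, hdvd, hp⟩
    exact ⟨hp, hdvd, by omega⟩
  · rintro ⟨hp, hdvd, -⟩
    have hple : p ≤ m := Nat.le_of_dvd (by omega) hdvd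
    have hpne : p ≠ m := by
      rintro rfl
      exact hnp hp
    exact ⟨⟨hp.two_le, by omega⟩, hdvd, hp⟩

-- ---- scoreB facts ----

theorem scoreB_nonneg (n : Int) : 0 ≤ scoreB n := by
  unfold scoreB
  split
  · omega
  · dsimp only
    split
    · exact Int.natCast_nonneg _
    · exact Int.natCast_nonneg _

theorem scoreB_eq_zero_of_le_two (n : Int) (h : n ≤ 2) : scoreB n = 0 := by
  unfold scoreB
  rw [if_pos h]

theorem scoreB_of_prime (n : Int) (h3 : 3 ≤ n) (hp : Nat.Prime n.toNat) :
    scoreB n = ((List.range' 2 (n.toNat - 2)).countP natPrime : Int) := by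
  unfold scoreB
  rw [if_neg (by omega)]
  dsimp only
  rw [if_pos ((natPrime_iff _).mpr hp)]

theorem scoreB_of_composite (n : Int) (h3 : 3 ≤ n) (hnp : ¬ Nat.Prime n.toNat) :
    scoreB n = ((n.toNat).primeFactors.card : Int) := by
  unfold scoreB
  rw [if_neg (by omega)]
  dsimp only
  rw [if_neg (by rw [natPrime_iff]; exact hnp)]
  rw [omegaGo_eq (n.toNat + 1) n.toNat 2 0 (by omega) (le_refl 2) (by omega) (fun p hp _ => hp.two_le)]
  simp

-- ---- A's loop body adds exactly scoreB w ----

theorem stepA_eq (cnt w : Int) :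
    (if w = 1 then cnt
     else if isPrime w = 1 then
       (PySem.List.pyRange 2 w 1).foldl (fun c j => if isPrime j = 1 then c + 1 else c) cnt
     else
       (PySem.List.pyRange 2 w 1).foldl
         (fun c k => if PySem.Int.mod w k = 0 ∧ isPrime k = 1 then c + 1 else c) cnt)
      = cnt + scoreB w := by
  by_cases h1 : w = 1
  · subst h1
    rw [if_pos rfl, scoreB_eq_zero_of_le_two 1 (by omega)]
    omega
  · rw [if_neg h1]
    by_cases h2 : w ≤ 2
    · rw [if_pos (isPrime_eq_one_of_le_two w h1 h2), PySem.List.pyRange_one_eq_nil h2,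
        scoreB_eq_zero_of_le_two w h2]
      simp
    · have h3 : 3 ≤ w := by omega
      by_cases hp : Nat.Prime w.toNat
      · rw [if_pos ((isPrime_iff_prime w (by omega)).mpr hp),
          foldl_count (fun j => isPrime j = 1), scoreB_of_prime w h3 hp,
          primeCount_eq w h3]
      · have hne : ¬ isPrime w = 1 := fun h => hp ((isPrime_iff_prime w (by omega)).mp h)
        rw [if_neg hne, foldl_count (fun k => PySem.Int.mod w k = 0 ∧ isPrime k = 1),
          divisorCount_eq w (by omega) hp, scoreB_of_composite w h3 hp]

theorem loopA_eq (l : List Int) (cnt : Int) :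
    l.foldl (fun cnt w =>
      if w = 1 then cnt
      else if isPrime w = 1 then
        (PySem.List.pyRange 2 w 1).foldl (fun c j => if isPrime j = 1 then c + 1 else c) cnt
      else
        (PySem.List.pyRange 2 w 1).foldl
          (fun c k => if PySem.Int.mod w k = 0 ∧ isPrime k = 1 then c + 1 else c) cnt) cnt
      = cnt + (l.map scoreB).sum := by
  induction l generalizing cnt with
  | nil => simp
  | cons w rest ih =>
    rw [List.foldl_cons, List.map_cons, List.sum_cons]
    rw [ih, stepA_eq]
    ring

theorem price_eq (weights : List Int) : price weights = price_alt weights := by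
  unfold price price_alt
  rw [loopA_eq]
  have hzero : (0:Int) + (weights.map scoreB).sum = (weights.map scoreB).sum := by ring
  rw [hzero]
  set s := (weights.map scoreB).sum with hs
  have hsnn : 0 ≤ s := List.sum_nonneg (by
    intro x hx
    rcases List.mem_map.mp hx with ⟨w, -, rfl⟩
    exact scoreB_nonneg w)
  by_cases h1 : s = 1
  · rw [if_pos h1, if_pos h1]
  · rw [if_neg h1, if_neg h1]
    by_cases h2 : s ≤ 2
    · rw [if_pos (isPrime_eq_one_of_le_two s h1 h2), PySem.List.pyRange_one_eq_nil h2,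
        scoreB_eq_zero_of_le_two s h2]
      simp
    · have h3 : 3 ≤ s := by omega
      by_cases hp : Nat.Prime s.toNat
      · rw [if_pos ((isPrime_iff_prime s (by omega)).mpr hp),
          foldl_count (fun j => isPrime j = 1), scoreB_of_prime s h3 hp,
          primeCount_eq s h3]
        ring
      · have hne : ¬ isPrime s = 1 := fun h => hp ((isPrime_iff_prime s (by omega)).mp h)
        rw [if_neg hne, foldl_count (fun k => PySem.Int.mod s k = 0 ∧ isPrime k = 1),
          divisorCount_eq s (by omega) hp, scoreB_of_composite s h3 hp]
        ring

-- ===== VERDICT (by name: the statement is the Claim_ definition above) =====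
theorem price_spec : Claim_equal_price := by
  intro weights _
  unfold Spec_price
  exact price_eq weights
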